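-- pv_equiv track=rewrite | github.com/yunj9877-dot/MediScanner | evaluate_three_models.py | check_hit
-- ===== SOURCE A (Python) =====
-- def check_hit(docs: list[str], must: list[str], context: list[str], top_k_list: list[int]) -> dict[int, bool]:
--     """
--     Hit 기준: 언어 구분 없이 전체 키워드 중 2개 이상 포함
--     """
--     results = {k: False for k in top_k_list}
--     all_kw = [kw.lower() for kw in (must + context)]
--     for i, doc in enumerate(docs):
--         doc_lower = doc.lower()
--         matched = sum(1 for kw in all_kw if kw in doc_lower)
--         if matched >= 2:
--             for k in top_k_list:
--                 if i < k:
--                     results[k] = True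
--     return results
-- ===== SOURCE B (Python) =====
-- def check_hit(docs: list[str], must: list[str], context: list[str], top_k_list: list[int]) -> dict[int, bool]:
--     # Keyword-major: build a per-doc match-count array, then threshold, then map ranks.
--     kws = [kw.lower() for kw in (must + context)]
--     lows = [doc.lower() for doc in docs]
--     counts = [0] * len(lows)
--     for kw in kws:
--         for i, low in enumerate(lows):
--             if kw in low:
--                 counts[i] += 1
--     hits = [i for i, c in enumerate(counts) if c >= 2]
--     first_hit = min(hits) if hits else None
--     return {k: first_hit is not None and first_hit < k for k in top_k_list}
-- ===== Notes on version B (the rewrite author's own statement) =====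
-- stated objective: alternative
-- what changed: B transposes the loops: instead of A's doc-major pass that re-marks every top_k dict entry for each qualifying doc, B does a keyword-major pass accumulating a per-doc match-count array, then extracts the minimal index with count >= 2, and finally maps each k to first_hit < k in a separate pass.
import Mathlib
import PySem

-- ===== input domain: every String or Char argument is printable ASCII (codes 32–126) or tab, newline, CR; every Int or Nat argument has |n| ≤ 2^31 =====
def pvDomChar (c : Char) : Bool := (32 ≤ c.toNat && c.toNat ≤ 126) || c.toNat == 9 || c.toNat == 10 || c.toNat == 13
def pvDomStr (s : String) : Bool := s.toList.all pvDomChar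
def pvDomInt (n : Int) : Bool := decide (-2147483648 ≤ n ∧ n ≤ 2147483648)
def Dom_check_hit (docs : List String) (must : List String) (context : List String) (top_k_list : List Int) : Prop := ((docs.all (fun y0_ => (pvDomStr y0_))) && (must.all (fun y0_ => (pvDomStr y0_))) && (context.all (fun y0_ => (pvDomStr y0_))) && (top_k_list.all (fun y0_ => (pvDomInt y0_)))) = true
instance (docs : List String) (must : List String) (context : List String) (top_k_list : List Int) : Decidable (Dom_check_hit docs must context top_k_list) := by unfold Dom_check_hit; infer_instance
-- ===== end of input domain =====

-- B inverts A's doc-major "mark every k for each qualifying doc" nested dict updates into a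
-- keyword-major pass over a per-doc count array, then min qualifying index, then one map over the ranks (objective: alternative).

-- ===== PORT A =====
def check_hit (docs : List String) (must : List String) (context : List String) (top_k_list : List Int) : List (Int × Bool) :=
  -- results = {k: False for k in top_k_list}
  let results0 : PySem.Dict Int Bool := top_k_list.foldl (fun d k => d.insert k false) PySem.Dict.empty
  -- all_kw = [kw.lower() for kw in (must + context)]
  let all_kw : List String := (must ++ context).map PySem.Str.lower
  -- for i, doc in enumerate(docs): ...
  let final : PySem.Dict Int Bool :=
    (PySem.List.enumerate docs 0).foldl (fun d p =>
      let doc_lower := PySem.Str.lower p.2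
      let matched : Int := (all_kw.map (fun kw => if PySem.Str.isIn kw doc_lower then (1 : Int) else 0)).sum
      if 2 ≤ matched then
        top_k_list.foldl (fun d k => if p.1 < k then d.insert k true else d) d
      else d) results0
  final.items

-- ===== PORT B =====
def check_hit_alt (docs : List String) (must : List String) (context : List String) (top_k_list : List Int) : List (Int × Bool) :=
  -- kws = [kw.lower() for kw in (must + context)]; lows = [doc.lower() for doc in docs]
  let kws : List String := (must ++ context).map PySem.Str.lower
  let lows : List String := docs.map PySem.Str.lower
  -- counts = [0]*len(lows); for kw in kws: for i, low in enumerate(lows): if kw in low: counts[i] += 1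
  let counts : List Int :=
    kws.foldl (fun cs kw =>
        List.zipWith (fun (c : Int) low => if PySem.Str.isIn kw low then c + 1 else c) cs lows)
      (List.replicate lows.length (0 : Int))
  -- hits = [i for i, c in enumerate(counts) if c >= 2]
  let hits : List Int := ((PySem.List.enumerate counts 0).filter (fun p => decide ((2 : Int) ≤ p.2))).map (·.1)
  -- first_hit = min(hits) if hits else None
  let first_hit : Option Int := if hits.isEmpty then none else PySem.List.min? hits (fun x => x)
  -- {k: first_hit is not None and first_hit < k for k in top_k_list}:
  -- the value depends only on k, so the comprehension's items are the deduped keys paired with the value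
  (PySem.List.dedup top_k_list).map (fun k =>
    (k, match first_hit with
        | none => false
        | some i => decide (i < k)))

-- ===== PRECONDITION & SPEC =====
def Spec_check_hit (docs : List String) (must : List String) (context : List String) (top_k_list : List Int) (out : List (Int × Bool)) : Prop := out = check_hit_alt docs must context top_k_list
instance (docs : List String) (must : List String) (context : List String) (top_k_list : List Int) (out : List (Int × Bool)) : Decidable (Spec_check_hit docs must context top_k_list out) := by unfold Spec_check_hit; infer_instance

-- ===== CLAIM (what is proved, stated in full; the proofs are below) =====
def Claim_equal_check_hit : Prop := ∀ (docs : List String) (must : List String) (context : List String) (top_k_list : List Int), Dom_check_hit docs must context top_k_list → Spec_check_hit docs must context top_k_list (check_hit docs must context top_k_list)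

-- ===== LEMMAS AND PROOFS =====

-- the inner loop "for k in top_k_list: if i < k: results[k] = True"
theorem pvInner (i k : Int) (tks : List Int) (d : PySem.Dict Int Bool)
    (hc : ∀ k' ∈ tks, d.contains k' = true) :
    (tks.foldl (fun d k' => if i < k' then d.insert k' true else d) d).getD k false
      = (if i < k ∧ k ∈ tks then true else d.getD k false) ∧
    (tks.foldl (fun d k' => if i < k' then d.insert k' true else d) d).keys = d.keys := by
  induction tks generalizing d with
  | nil => simp
  | cons t rest ih =>
    simp only [List.foldl_cons]
    by_cases ht : i < t
    · rw [if_pos ht]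
      have hcd : d.contains t = true := hc t (by simp)
      have hrest := ih (d.insert t true) (by
        intro k' hk'
        rw [PySem.Dict.contains_insert]
        simp [hc k' (List.mem_cons_of_mem _ hk')])
      refine ⟨?_, ?_⟩
      · rw [hrest.1, PySem.Dict.getD_insert]
        by_cases hkt : k = t
        · subst hkt; simp [ht]
        · rw [if_neg hkt]
          by_cases h1 : i < k ∧ k ∈ rest
          · rw [if_pos h1, if_pos ⟨h1.1, List.mem_cons_of_mem _ h1.2⟩]
          · rw [if_neg h1, if_neg (fun hc =>
              h1 ⟨hc.1, (List.mem_cons.mp hc.2).resolve_left hkt⟩)]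
      · rw [hrest.2, PySem.Dict.keys_insert_of_contains _ _ hcd]
    · rw [if_neg ht]
      have hrest := ih d (fun k' hk' => hc k' (List.mem_cons_of_mem _ hk'))
      refine ⟨?_, hrest.2⟩
      rw [hrest.1]
      by_cases hkt : k = t
      · subst hkt; simp [ht]
      · simp [hkt]

-- the outer loop preserves the key set
theorem pvOuterKeys (tks : List Int) (q : String → Bool)
    (ps : List (Int × String)) (d : PySem.Dict Int Bool)
    (hc : ∀ k' ∈ tks, d.contains k' = true) :
    (ps.foldl (fun d p =>
        if q p.2 then tks.foldl (fun d k' => if p.1 < k' then d.insert k' true else d) d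
        else d) d).keys = d.keys := by
  induction ps generalizing d with
  | nil => rfl
  | cons p rest ih =>
    simp only [List.foldl_cons]
    by_cases hq : q p.2 = true
    · rw [if_pos hq]
      have hc' : ∀ k' ∈ tks, (tks.foldl (fun d k' => if p.1 < k' then d.insert k' true else d) d).contains k' = true := by
        intro k' hk'
        rw [PySem.Dict.contains_iff_mem_keys, (pvInner p.1 k' tks d hc).2,
          ← PySem.Dict.contains_iff_mem_keys]
        exact hc k' hk'
      rw [ih _ hc', (pvInner p.1 0 tks d hc).2]
    · rw [if_neg hq]
      exact ih d hc

-- the outer loop over enumerated docs, for a fixed key k ∈ top_k_list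
theorem pvOuter (k : Int) (tks : List Int) (q : String → Bool)
    (ps : List (Int × String)) (d : PySem.Dict Int Bool)
    (hk : k ∈ tks) (hc : ∀ k' ∈ tks, d.contains k' = true) :
    (ps.foldl (fun d p =>
        if q p.2 then tks.foldl (fun d k' => if p.1 < k' then d.insert k' true else d) d
        else d) d).getD k false
      = (d.getD k false || ps.any (fun p => q p.2 && decide (p.1 < k))) := by
  induction ps generalizing d with
  | nil => simp
  | cons p rest ih =>
    simp only [List.foldl_cons, List.any_cons]
    by_cases hq : q p.2 = true
    · rw [if_pos hq, hq]
      have hc' : ∀ k' ∈ tks, (tks.foldl (fun d k' => if p.1 < k' then d.insert k' true else d) d).contains k' = true := by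
        intro k' hk'
        rw [PySem.Dict.contains_iff_mem_keys, (pvInner p.1 k' tks d hc).2,
          ← PySem.Dict.contains_iff_mem_keys]
        exact hc k' hk'
      rw [ih _ hc', (pvInner p.1 k tks d hc).1]
      by_cases hpk : p.1 < k
      · simp [hpk, hk]
      · simp [hpk]
    · have hqf : q p.2 = false := by simpa using hq
      rw [if_neg (by simp [hqf]), hqf]
      rw [ih d hc]
      simp

-- the initial dict {k: False for k in top_k_list} maps everything to false
theorem pvGetD0 (tks : List Int) (d : PySem.Dict Int Bool) (k : Int)
    (h : d.getD k false = false) :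
    (tks.foldl (fun d k => d.insert k false) d).getD k false = false := by
  induction tks generalizing d with
  | nil => simpa
  | cons t rest ih =>
    simp only [List.foldl_cons]
    exact ih _ (by rw [PySem.Dict.getD_insert]; split <;> simp [h])

-- keys of the initial dict
theorem pvKeys0 (tks : List Int) :
    (tks.foldl (fun d k => d.insert k false) (PySem.Dict.empty : PySem.Dict Int Bool)).keys
      = PySem.List.dedup tks := by
  rw [PySem.Dict.keys_foldl_insert]
  simp [PySem.Set.update_nil_left]

-- B's keyword-major count loop: length is preserved
theorem pvCountsLen (kws lows : List String) (cs : List Int) (h : cs.length = lows.length) :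
    (kws.foldl (fun cs kw =>
        List.zipWith (fun (c : Int) low => if PySem.Str.isIn kw low then c + 1 else c) cs lows) cs).length
      = lows.length := by
  induction kws generalizing cs with
  | nil => simpa
  | cons kw rest ih =>
    simp only [List.foldl_cons]
    exact ih _ (by simp [List.length_zipWith, h])

-- B's keyword-major count loop, element-wise: counts[i] = cs[i] + (number of keywords matching lows[i])
theorem pvCountsGet (kws lows : List String) (cs : List Int) (h : cs.length = lows.length)
    (i : Nat) (hi : i < lows.length)
    (hlen : i < (kws.foldl (fun cs kw =>
        List.zipWith (fun (c : Int) low => if PySem.Str.isIn kw low then c + 1 else c) cs lows) cs).length) :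
    (kws.foldl (fun cs kw =>
        List.zipWith (fun (c : Int) low => if PySem.Str.isIn kw low then c + 1 else c) cs lows) cs)[i]
      = cs[i]'(by omega) + (kws.countP (fun kw => PySem.Str.isIn kw lows[i]) : Int) := by
  induction kws generalizing cs with
  | nil => simp
  | cons kw rest ih =>
    simp only [List.foldl_cons]
    have hz : (List.zipWith (fun (c : Int) low => if PySem.Str.isIn kw low then c + 1 else c) cs lows).length = lows.length := by
      simp [List.length_zipWith, h]
    rw [ih _ hz (by
      simpa only [List.foldl_cons] using hlen)]
    rw [List.getElem_zipWith, List.countP_cons]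
    by_cases hm : PySem.Str.isIn kw lows[i] = true
    · simp only [hm, if_true]
      push_cast
      ring
    · have hmf := eq_false_of_ne_true hm
      simp only [hmf, Bool.false_eq_true, if_false]
      push_cast
      ring

-- enumerate commutes with map
theorem pvEnumMap {α β : Type} (f : α → β) (l : List α) (s : Int) :
    PySem.List.enumerate (l.map f) s = (PySem.List.enumerate l s).map (fun p => (p.1, f p.2)) := by
  induction l generalizing s with
  | nil => simp [PySem.List.enumerate_nil]
  | cons x t ih => simp [PySem.List.enumerate_cons, ih]

-- min of a strictly increasing nonempty list is its head
theorem pvFoldlMin (t : List Int) (x : Int) (h : ∀ y ∈ t, x ≤ y) : t.foldl min x = x := by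
  induction t generalizing x with
  | nil => rfl
  | cons y r ih =>
    simp only [List.foldl_cons]
    rw [min_eq_left (h y (by simp))]
    exact ih x (fun z hz => h z (List.mem_cons_of_mem _ hz))

theorem pvMinHead (l : List Int) (hl : l.Pairwise (· < ·)) (hne : l.isEmpty = false) :
    PySem.List.min? l (fun x => x) = l.head? := by
  cases l with
  | nil => simp at hne
  | cons x t =>
    rw [PySem.List.min?_id_cons]
    rcases List.pairwise_cons.mp hl with ⟨hlt, _⟩
    rw [pvFoldlMin t x (fun y hy => le_of_lt (hlt y hy))]
    rfl

-- on an index-increasing list, "some element satisfies q with index < k" iff "the FIRST q-element has index < k"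
theorem pvFindFirst (k : Int) (q : (Int × String) → Bool) (ps : List (Int × String))
    (hp : ps.Pairwise (fun a b => a.1 < b.1)) :
    ps.any (fun p => q p && decide (p.1 < k))
      = (match (ps.find? q).map (·.1) with
         | none => false
         | some i => decide (i < k)) := by
  induction ps with
  | nil => simp
  | cons p rest ih =>
    rcases List.pairwise_cons.mp hp with ⟨hlt, hrest⟩
    simp only [List.any_cons]
    by_cases hq : q p = true
    · rw [hq, List.find?_cons_of_pos hq]
      simp only [Option.map_some, Bool.true_and]
      by_cases hpk : p.1 < k
      · simp [hpk]
      · have hall : (rest.any fun p => q p && decide (p.1 < k)) = false := by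
          refine List.any_eq_false.mpr ?_
          intro x hx
          have hxk : ¬ x.1 < k := by have := hlt x hx; omega
          simp [hxk]
        simp [hpk, hall]
    · have hqf : q p = false := by simpa using hq
      rw [hqf, List.find?_cons_of_neg hq]
      simp only [Bool.false_and, Bool.false_or]
      exact ih hrest

-- B's "hits/min" staging computes the first qualifying index
theorem pvHitsFirst (q : (Int × String) → Bool) (ps : List (Int × String))
    (hp : ps.Pairwise (fun a b => a.1 < b.1)) :
    (if ((ps.filter q).map (·.1)).isEmpty then none
     else PySem.List.min? ((ps.filter q).map (·.1)) (fun x => x))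
      = (ps.find? q).map (·.1) := by
  by_cases he : ((ps.filter q).map (·.1)).isEmpty = true
  · rw [if_pos he]
    have hnil : ps.filter q = [] := by
      cases hfq : ps.filter q with
      | nil => rfl
      | cons a t => rw [hfq] at he; simp at he
    have : ps.find? q = none := by
      rw [List.find?_eq_none]
      intro x hx
      have := List.filter_eq_nil_iff.mp hnil x hx
      simpa using this
    simp [this]
  · have he' : ((ps.filter q).map (·.1)).isEmpty = false := by simpa using he
    rw [if_neg (by simp [he'])]
    have hpair : ((ps.filter q).map (·.1)).Pairwise ((· < ·) : Int → Int → Prop) := by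
      rw [List.pairwise_map]
      exact (hp.filter q)
    rw [pvMinHead _ hpair he', List.head?_map, List.head?_filter]

-- ===== VERDICT (by name: the statement is the Claim_ definition above) =====
theorem check_hit_spec : Claim_equal_check_hit := by
  intro docs must context top_k_list _
  unfold Spec_check_hit check_hit check_hit_alt
  simp only []
  set kws : List String := (must ++ context).map PySem.Str.lower with hkws
  set lows : List String := docs.map PySem.Str.lower with hlows
  set q : String → Bool :=
    fun s => decide ((2 : Int) ≤ (kws.countP (fun kw => PySem.Str.isIn kw (PySem.Str.lower s)) : Int)) with hq
  -- A's per-doc condition in terms of q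
  have hcond : ∀ s : String,
      ((2 : Int) ≤ ((kws.map (fun kw => if PySem.Str.isIn kw (PySem.Str.lower s) then (1 : Int) else 0)).sum))
        ↔ q s = true := by
    intro s
    rw [PySem.List.sum_map_ite_one_zero, hq]
    simp
  -- rewrite A's loop body into the q-form
  have hfun : (fun (d : PySem.Dict Int Bool) (p : Int × String) =>
      let doc_lower := PySem.Str.lower p.2
      let matched : Int := (kws.map (fun kw => if PySem.Str.isIn kw doc_lower then (1 : Int) else 0)).sum
      if 2 ≤ matched then
        top_k_list.foldl (fun d k => if p.1 < k then d.insert k true else d) d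
      else d)
      = (fun d p =>
        if q p.2 then
          top_k_list.foldl (fun d k => if p.1 < k then d.insert k true else d) d
        else d) := by
    funext d p
    simp only []
    by_cases hm : (2 : Int) ≤ ((kws.map (fun kw => if PySem.Str.isIn kw (PySem.Str.lower p.2) then (1 : Int) else 0)).sum)
    · rw [if_pos hm, if_pos ((hcond p.2).mp hm)]
    · rw [if_neg hm, if_neg (by
        intro hc
        exact hm ((hcond p.2).mpr (by simpa using hc)))]
  rw [hfun]
  set results0 : PySem.Dict Int Bool :=
    top_k_list.foldl (fun d k => d.insert k false) PySem.Dict.empty with hr0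
  have hc0 : ∀ k' ∈ top_k_list, results0.contains k' = true := by
    intro k' hk'
    rw [PySem.Dict.contains_iff_mem_keys, hr0, pvKeys0]
    rwa [PySem.List.mem_dedup]
  -- B's counts array equals lows.map (count of matching keywords)
  have hcounts : (kws.foldl (fun cs kw =>
        List.zipWith (fun (c : Int) low => if PySem.Str.isIn kw low then c + 1 else c) cs lows)
      (List.replicate lows.length (0 : Int)))
      = lows.map (fun low => (kws.countP (fun kw => PySem.Str.isIn kw low) : Int)) := by
    have hlen := pvCountsLen kws lows (List.replicate lows.length (0 : Int)) (by simp)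
    apply List.ext_getElem (by simpa using hlen)
    intro i h1 h2
    rw [pvCountsGet kws lows _ (by simp) i (by omega) h1]
    simp
  rw [hcounts]
  -- B's hits list is the filtered enumeration of docs under q
  have henum : PySem.List.enumerate (lows.map (fun low => (kws.countP (fun kw => PySem.Str.isIn kw low) : Int))) 0
      = (PySem.List.enumerate docs 0).map
          (fun p => (p.1, (kws.countP (fun kw => PySem.Str.isIn kw (PySem.Str.lower p.2)) : Int))) := by
    rw [hlows, pvEnumMap, pvEnumMap, List.map_map]
    rfl
  rw [henum]
  have hhits : (((PySem.List.enumerate docs 0).map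
          (fun p => (p.1, (kws.countP (fun kw => PySem.Str.isIn kw (PySem.Str.lower p.2)) : Int)))).filter
        (fun p => decide ((2 : Int) ≤ p.2))).map (·.1)
      = ((PySem.List.enumerate docs 0).filter (fun p => q p.2)).map (·.1) := by
    rw [List.filter_map, List.map_map]
    rfl
  rw [hhits]
  rw [pvHitsFirst (fun p => q p.2) (PySem.List.enumerate docs 0) (PySem.List.pairwise_lt_enumerate docs 0)]
  -- A's dict: same key list, and each key's value is the any-form
  have hkeys : ((PySem.List.enumerate docs 0).foldl (fun d p =>
      if q p.2 then top_k_list.foldl (fun d k' => if p.1 < k' then d.insert k' true else d) d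
      else d) results0).keys = PySem.List.dedup top_k_list := by
    rw [pvOuterKeys top_k_list q (PySem.List.enumerate docs 0) results0 hc0, hr0, pvKeys0]
  have hnd : ((PySem.List.enumerate docs 0).foldl (fun d p =>
      if q p.2 then top_k_list.foldl (fun d k' => if p.1 < k' then d.insert k' true else d) d
      else d) results0).keys.Nodup := by
    rw [hkeys]; exact PySem.List.nodup_dedup _
  rw [PySem.Dict.items_eq_map_keys _ hnd false, hkeys]
  refine List.map_congr_left ?_
  intro k hkmem
  have hk : k ∈ top_k_list := (PySem.List.mem_dedup _ _).mp hkmem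
  rw [pvOuter k top_k_list q (PySem.List.enumerate docs 0) results0 hk hc0]
  rw [hr0, pvGetD0 top_k_list PySem.Dict.empty k (by simp), Bool.false_or]
  rw [pvFindFirst k (fun p => q p.2) (PySem.List.enumerate docs 0)
    (PySem.List.pairwise_lt_enumerate docs 0)]
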